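-- pv_equiv track=rewrite | github.com/fineman999/Algorithm | BaekJoon/Silver/lostblack.py | solution
-- ===== SOURCE A (Python) =====
-- def solution(arr):
--     check = 1
--     answer = 0
--     for element in arr:
--         if element.isdigit():
--             answer += int(element)*check
--         elif element == '-':
--             check = -1
--     return answer
-- ===== SOURCE B (Python) =====
-- def solution(arr):
--     if '-' in arr:
--         i = arr.index('-')
--     else:
--         i = len(arr)
--     return sum(int(x) for x in arr[:i] if x.isdigit()) \
--          - sum(int(x) for x in arr[i:] if x.isdigit())
-- ===== Notes on version B (the rewrite author's own statement) =====
-- stated objective: simpler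
-- what changed: Replaces the stateful sign-flipping scan with an index-then-partition shape: find the first '-', add the digit tokens before it and subtract those from it on, as two independent sums.
import Mathlib
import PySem

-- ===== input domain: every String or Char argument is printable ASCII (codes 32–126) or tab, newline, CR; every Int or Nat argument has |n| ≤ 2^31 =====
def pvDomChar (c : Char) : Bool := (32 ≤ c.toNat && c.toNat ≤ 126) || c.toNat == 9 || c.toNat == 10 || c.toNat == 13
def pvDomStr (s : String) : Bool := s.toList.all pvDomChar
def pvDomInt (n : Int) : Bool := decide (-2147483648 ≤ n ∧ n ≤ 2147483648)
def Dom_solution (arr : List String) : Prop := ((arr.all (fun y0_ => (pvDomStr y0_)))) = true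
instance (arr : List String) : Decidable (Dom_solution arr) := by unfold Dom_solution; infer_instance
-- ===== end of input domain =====

-- B replaces A's stateful sign-flipping scan by partitioning at the first '-' and
-- taking the difference of two independent digit-token sums (objective: simpler).

-- ===== PORT A =====
def solution (arr : List String) : Int :=
  (arr.foldl (fun st element =>
    if PySem.Str.strIsdigit element then (st.1, st.2 + (PySem.Int.ofStr? element).getD 0 * st.1)
    else if element == "-" then ((-1 : Int), st.2)
    else st) ((1 : Int), (0 : Int))).2

-- ===== PORT B =====
-- sum(int(x) for x in xs if x.isdigit())
def pvDigSum (xs : List String) : Int :=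
  (xs.filter (fun x => PySem.Str.strIsdigit x)).foldl (fun a x => a + (PySem.Int.ofStr? x).getD 0) 0

def solution_alt (arr : List String) : Int :=
  let i : Int := match PySem.List.index? arr "-" with
    | some j => (j : Int)
    | none => (arr.length : Int)
  pvDigSum (PySem.List.slice arr none (some i)) - pvDigSum (PySem.List.slice arr (some i) none)

-- ===== PRECONDITION & SPEC =====
def Spec_solution (arr : List String) (out : Int) : Prop := out = solution_alt arr
instance (arr : List String) (out : Int) : Decidable (Spec_solution arr out) := by unfold Spec_solution; infer_instance

-- ===== CLAIM (what is proved, stated in full; the proofs are below) =====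
def Claim_equal_solution : Prop := ∀ (arr : List String), Dom_solution arr → Spec_solution arr (solution arr)

-- ===== LEMMAS AND PROOFS =====

-- the loop body of A
def pvStep (st : Int × Int) (element : String) : Int × Int :=
  if PySem.Str.strIsdigit element then (st.1, st.2 + (PySem.Int.ofStr? element).getD 0 * st.1)
  else if element == "-" then ((-1 : Int), st.2)
  else st

-- value contributed by a token
def pvVal (x : String) : Int := if PySem.Str.strIsdigit x then (PySem.Int.ofStr? x).getD 0 else 0

theorem pvStep_digit (st : Int × Int) (x : String) (h : PySem.Str.strIsdigit x = true) :
    pvStep st x = (st.1, st.2 + (PySem.Int.ofStr? x).getD 0 * st.1) := by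
  unfold pvStep; rw [if_pos h]

theorem pvStep_minus' (st : Int × Int) : pvStep st "-" = ((-1 : Int), st.2) := by
  unfold pvStep
  rw [if_neg (by decide), if_pos (by decide)]

theorem pvStep_other (st : Int × Int) (x : String) (h : PySem.Str.strIsdigit x = false)
    (h2 : x ≠ "-") : pvStep st x = st := by
  unfold pvStep
  rw [if_neg (by simp only [h]; decide), if_neg (by simpa using h2)]

theorem pvFoldl_shift (xs : List String) (a : Int) :
    xs.foldl (fun a x => a + (PySem.Int.ofStr? x).getD 0) a
      = a + xs.foldl (fun a x => a + (PySem.Int.ofStr? x).getD 0) 0 := by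
  induction xs generalizing a with
  | nil => simp
  | cons x xs ih =>
    rw [List.foldl_cons, List.foldl_cons, ih, ih ((0 : Int) + (PySem.Int.ofStr? x).getD 0)]
    ring

theorem pvDigSum_nil : pvDigSum [] = 0 := rfl

theorem pvDigSum_cons (x : String) (xs : List String) :
    pvDigSum (x :: xs) = pvVal x + pvDigSum xs := by
  unfold pvDigSum pvVal
  by_cases h : PySem.Str.strIsdigit x
  · rw [if_pos h, List.filter_cons_of_pos (by simpa using h), List.foldl_cons, pvFoldl_shift]
    ring
  · rw [if_neg h, List.filter_cons_of_neg (by simpa using h)]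
    ring

theorem pvLoop_neg (xs : List String) (a : Int) :
    (xs.foldl pvStep ((-1 : Int), a)).2 = a - pvDigSum xs := by
  induction xs generalizing a with
  | nil => simp [pvDigSum]
  | cons x xs ih =>
    rw [List.foldl_cons, pvDigSum_cons]
    by_cases h : PySem.Str.strIsdigit x
    · rw [pvStep_digit _ _ h, ih]
      unfold pvVal; rw [if_pos h]; ring
    · by_cases h2 : x = "-"
      · subst h2
        rw [pvStep_minus', ih]
        unfold pvVal
        rw [if_neg h]; ring
      · rw [pvStep_other _ _ (by simpa using h) h2, ih]
        unfold pvVal; rw [if_neg h]; ring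

theorem pvLoop_pos (xs : List String) (a : Int) :
    (xs.foldl pvStep ((1 : Int), a)).2
      = a + pvDigSum (xs.take ((PySem.List.index? xs "-").getD xs.length))
          - pvDigSum (xs.drop ((PySem.List.index? xs "-").getD xs.length)) := by
  induction xs generalizing a with
  | nil => simp [pvDigSum]
  | cons x xs ih =>
    rw [List.foldl_cons]
    by_cases hm : x = "-"
    · subst hm
      rw [PySem.List.index?_cons_self]
      simp only [Option.getD_some, List.take_zero, List.drop_zero]
      rw [pvStep_minus', pvLoop_neg, pvDigSum_cons]
      have hv : pvVal "-" = 0 := by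
        unfold pvVal
        rw [if_neg (by decide)]
      rw [pvDigSum_nil, hv]; ring
    · have hgetD : (PySem.List.index? (x :: xs) "-").getD (x :: xs).length
          = (PySem.List.index? xs "-").getD xs.length + 1 := by
        rw [PySem.List.index?_cons_of_ne xs hm]
        cases PySem.List.index? xs "-" <;> simp
      rw [hgetD]
      simp only [List.take_succ_cons, List.drop_succ_cons, pvDigSum_cons]
      by_cases h : PySem.Str.strIsdigit x
      · rw [pvStep_digit _ _ h, ih]
        unfold pvVal; rw [if_pos h]; ring
      · rw [pvStep_other _ _ (by simpa using h) hm, ih]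
        unfold pvVal; rw [if_neg h]; ring

theorem pvAlt_eq (arr : List String) :
    solution_alt arr
      = pvDigSum (arr.take ((PySem.List.index? arr "-").getD arr.length))
        - pvDigSum (arr.drop ((PySem.List.index? arr "-").getD arr.length)) := by
  unfold solution_alt
  cases h : PySem.List.index? arr "-" with
  | none =>
    simp only [Option.getD_none]
    rw [PySem.List.slice_to_natCast, PySem.List.slice_from_natCast]
  | some j =>
    simp only [Option.getD_some]
    rw [PySem.List.slice_to_natCast, PySem.List.slice_from_natCast]

-- ===== VERDICT (by name: the statement is the Claim_ definition above) =====
theorem solution_spec : Claim_equal_solution := by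
  intro arr _
  unfold Spec_solution solution
  rw [pvAlt_eq]
  have hfun : (fun (st : Int × Int) element =>
      if PySem.Str.strIsdigit element then (st.1, st.2 + (PySem.Int.ofStr? element).getD 0 * st.1)
      else if element == "-" then ((-1 : Int), st.2)
      else st) = pvStep := by
    funext st e; rfl
  rw [hfun, pvLoop_pos]
  ring
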